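-- pv_equiv track=rewrite | github.com/afonsosilva97/advent-of-code | 2025/12_02/solution.py | get_answer_part_2
-- ===== SOURCE A (Python) =====
-- def get_answer_part_2(id_ranges):
--     sum_invalid_ids = 0
--     invalid_ids = []
--
--     for id_range in id_ranges:
--         for id_value in range(id_range[0], id_range[1] + 1):
--             value_str = str(id_value)
--             value_len = len(value_str)
--
--             for pattern_split_num in range(1, value_len + 1):
--                 if value_len % pattern_split_num != 0:
--                     continue
--
--                 for i in range(1, pattern_split_num):
--                     pattern_split_size = value_len // pattern_split_num
--                     position_1 = (i - 1) * pattern_split_size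
--                     position_2 = i * pattern_split_size
--                     position_3 = (i + 1) * pattern_split_size
--                     first_half, second_half = (
--                         value_str[position_1:position_2],
--                         value_str[position_2:position_3],
--                     )
--
--                     if first_half != second_half:
--                         break
--
--                     if i == pattern_split_num - 1:
--                         sum_invalid_ids += id_value
--                         invalid_ids.append(id_value)
--
--     return sum(list(dict.fromkeys(invalid_ids)))
-- ===== SOURCE B (Python) =====
-- def is_periodic(s):
--     n = len(s)
--     return any(n % d == 0 and s == s[:d] * (n // d) for d in range(1, n))
--
--
-- def get_answer_part_2(id_ranges):
--     seen = set()
--     total = 0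
--     for id_range in id_ranges:
--         for x in range(id_range[0], id_range[1] + 1):
--             if x not in seen and is_periodic(str(x)):
--                 seen.add(x)
--                 total += x
--     return total
-- ===== Notes on version B (the rewrite author's own statement) =====
-- stated objective: simpler
-- what changed: Replaces A's pairwise consecutive-block scan per split count plus an unused running sum and a final dict.fromkeys dedup pass with a direct periodicity test (s == s[:d] * (n//d) for each proper divisor block length d) and a single pass keeping a seen-set and a running total.
import Mathlib
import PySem

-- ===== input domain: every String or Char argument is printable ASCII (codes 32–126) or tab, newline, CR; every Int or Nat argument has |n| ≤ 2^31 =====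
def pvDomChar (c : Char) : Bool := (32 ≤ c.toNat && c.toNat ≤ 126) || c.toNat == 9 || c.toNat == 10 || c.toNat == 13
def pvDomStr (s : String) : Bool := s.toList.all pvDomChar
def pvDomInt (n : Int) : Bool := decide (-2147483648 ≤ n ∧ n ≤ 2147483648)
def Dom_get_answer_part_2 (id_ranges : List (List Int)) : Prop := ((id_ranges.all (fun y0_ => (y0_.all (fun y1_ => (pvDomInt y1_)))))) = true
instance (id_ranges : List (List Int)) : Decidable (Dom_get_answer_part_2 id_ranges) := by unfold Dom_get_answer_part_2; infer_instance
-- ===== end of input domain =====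

-- B replaces A's pairwise consecutive-block comparisons per split count, the unused running
-- sum and the final dict.fromkeys dedup pass by a direct test s == s[:d] * (n//d) per block
-- length d, a running seen-set and a running total (objective: simpler; same asymptotics).

-- ===== PORT A =====
-- inner 'for i in range(1, pattern_split_num)' loop with its break, on the remaining indices
def pvInnerA (v : Int) (vs : List Char) (L k : Int) :
    List Int → Int × List Int → Int × List Int
  | [], st => st
  | i :: rest, st =>
      let d := PySem.Int.floordiv L k
      let p1 := (i - 1) * d
      let p2 := i * d
      let p3 := (i + 1) * d
      let fh := PySem.List.slice vs (some p1) (some p2)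
      let sh := PySem.List.slice vs (some p2) (some p3)
      if fh ≠ sh then st
      else
        let st' := if i = k - 1 then (st.1 + v, st.2 ++ [v]) else st
        pvInnerA v vs L k rest st'

def get_answer_part_2 (id_ranges : List (List Int)) : Int :=
  let st :=
    id_ranges.foldl (fun st id_range =>
      (PySem.List.pyRange ((PySem.List.pyGet? id_range 0).getD 0)
          (((PySem.List.pyGet? id_range 1).getD 0) + 1)).foldl
        (fun st id_value =>
          let value_str := PySem.Int.toChars id_value
          let value_len : Int := value_str.length
          (PySem.List.pyRange 1 (value_len + 1)).foldl
            (fun st k =>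
              if PySem.Int.mod value_len k ≠ 0 then st
              else pvInnerA id_value value_str value_len k (PySem.List.pyRange 1 k) st)
            st)
        st)
      ((0 : Int), ([] : List Int))
  (PySem.List.dedup st.2).sum

-- ===== PORT B =====
def pvIsPeriodic (s : List Char) : Bool :=
  let n : Int := s.length
  (PySem.List.pyRange 1 n).any (fun d =>
    PySem.Int.mod n d == 0 &&
      s == PySem.List.pyRepeat (PySem.List.slice s none (some d)) (PySem.Int.floordiv n d))

def get_answer_part_2_alt (id_ranges : List (List Int)) : Int :=
  let st :=
    id_ranges.foldl (fun (st : PySem.Set Int × Int) id_range =>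
      (PySem.List.pyRange ((PySem.List.pyGet? id_range 0).getD 0)
          (((PySem.List.pyGet? id_range 1).getD 0) + 1)).foldl
        (fun st x =>
          if !(PySem.Set.contains st.1 x) && pvIsPeriodic (PySem.Int.toChars x)
          then (PySem.Set.add st.1 x, st.2 + x) else st)
        st)
      ((PySem.Set.empty : PySem.Set Int), (0 : Int))
  st.2

-- ===== PRECONDITION & SPEC =====
-- Pre_ excludes exactly the inputs where A (and B) raise IndexError: a range list with fewer than two entries.
def Pre_get_answer_part_2 (id_ranges : List (List Int)) : Prop :=
  ∀ r ∈ id_ranges, 2 ≤ r.length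
instance (id_ranges : List (List Int)) : Decidable (Pre_get_answer_part_2 id_ranges) := by
  unfold Pre_get_answer_part_2; infer_instance
def pvWitness_get_answer_part_2 : List (List Int) := [[1, 25], [20, 40]]
def Spec_get_answer_part_2 (id_ranges : List (List Int)) (out : Int) : Prop := out = get_answer_part_2_alt id_ranges
instance (id_ranges : List (List Int)) (out : Int) : Decidable (Spec_get_answer_part_2 id_ranges out) := by unfold Spec_get_answer_part_2; infer_instance

-- ===== CLAIM (what is proved, stated in full; the proofs are below) =====
def Claim_equal_get_answer_part_2 : Prop := ∀ (id_ranges : List (List Int)), Dom_get_answer_part_2 id_ranges → Pre_get_answer_part_2 id_ranges → Spec_get_answer_part_2 id_ranges (get_answer_part_2 id_ranges)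

-- ===== LEMMAS AND PROOFS =====

-- A's comparison of adjacent blocks at index i, block size L // k
abbrev pvBlockEq (vs : List Char) (L k i : Int) : Prop :=
  PySem.List.slice vs (some ((i - 1) * PySem.Int.floordiv L k)) (some (i * PySem.Int.floordiv L k)) =
  PySem.List.slice vs (some (i * PySem.Int.floordiv L k)) (some ((i + 1) * PySem.Int.floordiv L k))

-- the split counts k at which A's middle loop appends id_value
abbrev pvGoodK (vs : List Char) (L k : Int) : Prop :=
  PySem.Int.mod L k = 0 ∧ 1 < k ∧ ∀ i : Int, 1 ≤ i → i < k → pvBlockEq vs L k i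

-- how many times A appends a given id_value
def pvCnt (vs : List Char) : Nat :=
  ((PySem.List.pyRange 1 ((vs.length : Int) + 1)).filter
    (fun k => decide (pvGoodK vs (vs.length : Int) k))).length

theorem pvInnerA_eq (v : Int) (vs : List Char) (L k : Int) (j : Int) (st : Int × List Int) :
    pvInnerA v vs L k (PySem.List.pyRange j k) st =
      if j < k ∧ ∀ i : Int, j ≤ i → i < k → pvBlockEq vs L k i
      then (st.1 + v, st.2 ++ [v]) else st := by
  by_cases hjk : j < k
  · have hn : (k - j).toNat ≠ 0 := by omega
    generalize hm : (k - j).toNat = m at *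
    induction m generalizing j st with
    | zero => omega
    | succ m ih =>
      rw [PySem.List.pyRange_one_cons hjk]
      show (if PySem.List.slice vs (some ((j-1) * PySem.Int.floordiv L k)) (some (j * PySem.Int.floordiv L k)) ≠
              PySem.List.slice vs (some (j * PySem.Int.floordiv L k)) (some ((j+1) * PySem.Int.floordiv L k))
            then st
            else pvInnerA v vs L k (PySem.List.pyRange (j+1) k)
              (if j = k - 1 then (st.1 + v, st.2 ++ [v]) else st)) = _
      by_cases hb : pvBlockEq vs L k j
      · rw [if_neg (by unfold pvBlockEq at hb; simpa using hb)]
        by_cases hlast : j = k - 1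
        · rw [if_pos hlast]
          rw [PySem.List.pyRange_one_eq_nil (by omega)]
          show (st.1 + v, st.2 ++ [v]) = _
          rw [if_pos ⟨hjk, fun i h1 h2 => by
            have hij : i = j := by omega
            rw [hij]; exact hb⟩]
        · rw [if_neg hlast]
          by_cases hjk' : j + 1 < k
          · rw [ih (j+1) st hjk' (by omega) (by omega)]
            have : ((j + 1 < k ∧ ∀ i : Int, j + 1 ≤ i → i < k → pvBlockEq vs L k i)) ↔
                   ((j < k ∧ ∀ i : Int, j ≤ i → i < k → pvBlockEq vs L k i)) := by
              constructor
              · rintro ⟨_, h⟩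
                exact ⟨hjk, fun i h1 h2 => by
                  by_cases hij : i = j
                  · rwa [hij]
                  · exact h i (by omega) h2⟩
              · rintro ⟨_, h⟩
                exact ⟨hjk', fun i h1 h2 => h i (by omega) h2⟩
            split_ifs with h1 h2 h3 <;> try rfl
            · exact absurd (this.mp h1) h2
            · exact absurd (this.mpr h3) h1
          · omega
      · rw [if_pos (by unfold pvBlockEq at hb; simpa using hb)]
        rw [if_neg]
        rintro ⟨_, h⟩
        exact hb (h j le_rfl hjk)
  · rw [PySem.List.pyRange_one_eq_nil (by omega)]
    show st = _
    rw [if_neg (by rintro ⟨h, _⟩; omega)]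

theorem pvMiddleA_eq (v : Int) (vs : List Char) (st : Int × List Int) :
    ((PySem.List.pyRange 1 ((vs.length : Int) + 1)).foldl
      (fun st k =>
        if PySem.Int.mod (vs.length : Int) k ≠ 0 then st
        else pvInnerA v vs ((vs.length : Int)) k (PySem.List.pyRange 1 k) st)
      st).2 = st.2 ++ List.replicate (pvCnt vs) v := by
  have hbody : (fun (st : Int × List Int) k =>
        if PySem.Int.mod (vs.length : Int) k ≠ 0 then st
        else pvInnerA v vs ((vs.length : Int)) k (PySem.List.pyRange 1 k) st)
      = (fun (st : Int × List Int) k =>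
          ((fun (s : Int) k => if pvGoodK vs (vs.length : Int) k then s + v else s) st.1 k,
           (fun (ids : List Int) k => if pvGoodK vs (vs.length : Int) k then ids ++ [v] else ids) st.2 k)) := by
    funext st k
    rw [pvInnerA_eq]
    simp only [pvGoodK]
    by_cases hm : PySem.Int.mod (vs.length : Int) k = 0 <;>
      by_cases hg : ((1:Int) < k ∧ ∀ i:Int, 1 ≤ i → i < k → pvBlockEq vs (vs.length : Int) k i) <;>
      (simp [hm, hg] <;> (split_ifs with hX <;> simp_all))
  rw [hbody]
  rw [PySem.List.foldl_prod_mk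
        (f := fun (s : Int) k => if pvGoodK vs (vs.length : Int) k then s + v else s)
        (g := fun (ids : List Int) k => if pvGoodK vs (vs.length : Int) k then ids ++ [v] else ids)]
  show List.foldl (fun ids k => if pvGoodK vs (vs.length : Int) k then ids ++ [v] else ids) st.2 _
      = _
  rw [PySem.List.foldl_append_ite (p := fun k => pvGoodK vs (vs.length : Int) k) (f := fun _ => v)]
  unfold pvCnt
  congr 1
  exact List.map_const'

theorem pvBlocksOfRepeat (b : List Char) (d k i : Nat) (hd : b.length = d) (hik : i < k) :
    (((List.replicate k b).flatten.drop (i * d)).take d) = b := by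
  induction i generalizing k with
  | zero =>
    obtain ⟨k', rfl⟩ : ∃ k', k = k' + 1 := ⟨k - 1, by omega⟩
    rw [List.replicate_succ, List.flatten_cons, Nat.zero_mul, List.drop_zero]
    exact List.take_left' hd
  | succ i ih =>
    obtain ⟨k', rfl⟩ : ∃ k', k = k' + 1 := ⟨k - 1, by omega⟩
    rw [List.replicate_succ, List.flatten_cons]
    have harith : (i + 1) * d = b.length + i * d := by rw [hd]; ring
    rw [harith, List.drop_append]
    rw [List.drop_eq_nil_of_le (by omega : b.length ≤ b.length + i * d), List.nil_append,
      Nat.add_sub_cancel_left]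
    exact ih k' (by omega)

theorem pvRepeatOfBlocks (cs : List Char) (d k : Nat) (hlen : cs.length = k * d)
    (h : ∀ i : Nat, 1 ≤ i → i < k → (cs.drop ((i - 1) * d)).take d = (cs.drop (i * d)).take d) :
    cs = (List.replicate k (cs.take d)).flatten := by
  induction k generalizing cs with
  | zero =>
    simp only [Nat.zero_mul] at hlen
    simp [List.eq_nil_of_length_eq_zero hlen]
  | succ k ih =>
    rw [List.replicate_succ, List.flatten_cons]
    conv_lhs => rw [← List.take_append_drop d cs]
    congr 1
    have hlen' : (cs.drop d).length = k * d := by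
      rw [List.length_drop, hlen, Nat.succ_mul, Nat.add_sub_cancel]
    have hblocks' : ∀ i : Nat, 1 ≤ i → i < k →
        ((cs.drop d).drop ((i - 1) * d)).take d = ((cs.drop d).drop (i * d)).take d := by
      intro i h1 h2
      obtain ⟨j, rfl⟩ : ∃ j, i = j + 1 := ⟨i - 1, by omega⟩
      rw [List.drop_drop, List.drop_drop]
      simp only [Nat.add_sub_cancel]
      have e1 : d + j * d = (j + 1) * d := by ring
      have e2 : d + (j + 1) * d = (j + 1 + 1) * d := by ring
      rw [e1, e2]
      have h3 := h (j + 1 + 1) (by omega) (by omega)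
      have e3 : (j + 1 + 1) - 1 = j + 1 := by omega
      rw [e3] at h3
      exact h3
    rw [ih (cs.drop d) hlen' hblocks']
    congr 1
    by_cases hk : k = 0
    · subst hk; simp
    · have h1 := h 1 le_rfl (by omega)
      simp at h1
      rw [← h1]

theorem pvFloordiv_cast (n kN : Nat) (hk : 0 < kN) :
    PySem.Int.floordiv (n : Int) (kN : Int) = ((n / kN : Nat) : Int) := by
  rw [PySem.Int.floordiv_eq_ediv_of_pos (by exact_mod_cast hk)]
  exact (Int.natCast_ediv n kN).symm

theorem pvBlockEq_nat (cs : List Char) (kN iN : Nat) (hk : 0 < kN) (hi : 1 ≤ iN) :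
    pvBlockEq cs (cs.length : Int) (kN : Int) (iN : Int) ↔
      (cs.drop ((iN - 1) * (cs.length / kN))).take (cs.length / kN) =
      (cs.drop (iN * (cs.length / kN))).take (cs.length / kN) := by
  unfold pvBlockEq
  rw [pvFloordiv_cast _ _ hk]
  set dN := cs.length / kN with hd
  obtain ⟨j, rfl⟩ : ∃ j, iN = j + 1 := ⟨iN - 1, by omega⟩
  have c1 : ((j + 1 : Nat) : Int) - 1 = ((j : Nat) : Int) := by push_cast; ring
  have c2 : ((j + 1 : Nat) : Int) + 1 = ((j + 2 : Nat) : Int) := by push_cast; ring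
  rw [c1, c2, ← Nat.cast_mul, ← Nat.cast_mul, ← Nat.cast_mul,
    PySem.List.slice_natCast, PySem.List.slice_natCast]
  have e1 : (j + 1) * dN - j * dN = dN := by simp [Nat.succ_mul]
  have e2 : (j + 2) * dN - (j + 1) * dN = dN := by
    have : (j + 2) * dN = (j + 1) * dN + dN := by ring
    simp [this]
  rw [e1, e2]
  simp

theorem pvA_char (cs : List Char) :
    pvCnt cs ≠ 0 ↔ ∃ kN : Nat, 2 ≤ kN ∧ kN ≤ cs.length ∧ kN ∣ cs.length ∧
      (∀ iN : Nat, 1 ≤ iN → iN < kN →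
        (cs.drop ((iN - 1) * (cs.length / kN))).take (cs.length / kN) =
        (cs.drop (iN * (cs.length / kN))).take (cs.length / kN)) := by
  unfold pvCnt
  rw [Ne, List.length_eq_zero_iff, List.filter_eq_nil_iff]
  push_neg
  constructor
  · rintro ⟨k, hmem, hp⟩
    rw [PySem.List.mem_pyRange_one] at hmem
    obtain ⟨hm1, hm2⟩ := hmem
    simp only [decide_eq_true_eq] at hp
    obtain ⟨hmod, hk1, hblocks⟩ := hp
    have hk0 : 0 ≤ k := by omega
    obtain ⟨kN, rfl⟩ : ∃ kN : Nat, k = (kN : Int) := ⟨k.toNat, (Int.toNat_of_nonneg hk0).symm⟩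
    refine ⟨kN, by exact_mod_cast hk1, by omega, ?_, ?_⟩
    · rw [PySem.Int.mod_eq_zero_iff_dvd] at hmod
      exact_mod_cast hmod
    · intro iN h1 h2
      rw [← pvBlockEq_nat cs kN iN (by omega) h1]
      exact hblocks (iN : Int) (by exact_mod_cast h1) (by exact_mod_cast h2)
  · rintro ⟨kN, hk2, hkn, hdvd, hblocks⟩
    refine ⟨(kN : Int), ?_, ?_⟩
    · rw [PySem.List.mem_pyRange_one]
      constructor
      · exact_mod_cast (by omega : 1 ≤ kN)
      · have : (kN : Int) ≤ (cs.length : Int) := by exact_mod_cast hkn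
        omega
    · simp only [decide_eq_true_eq]
      refine ⟨?_, by exact_mod_cast hk2, ?_⟩
      · rw [PySem.Int.mod_eq_zero_iff_dvd]
        exact_mod_cast hdvd
      · intro i h1 h2
        have h0 : 0 ≤ i := by omega
        obtain ⟨iN, rfl⟩ : ∃ iN : Nat, i = (iN : Int) := ⟨i.toNat, (Int.toNat_of_nonneg h0).symm⟩
        rw [pvBlockEq_nat cs kN iN (by omega) (by exact_mod_cast h1)]
        exact hblocks iN (by exact_mod_cast h1) (by exact_mod_cast h2)

theorem pvB_char (cs : List Char) :
    pvIsPeriodic cs = true ↔ ∃ dN : Nat, 1 ≤ dN ∧ dN < cs.length ∧ dN ∣ cs.length ∧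
      cs = (List.replicate (cs.length / dN) (cs.take dN)).flatten := by
  unfold pvIsPeriodic
  rw [List.any_eq_true]
  constructor
  · rintro ⟨d, hmem, hp⟩
    rw [PySem.List.mem_pyRange_one] at hmem
    obtain ⟨hm1, hm2⟩ := hmem
    have hd0 : 0 ≤ d := by omega
    obtain ⟨dN, rfl⟩ : ∃ dN : Nat, d = (dN : Int) := ⟨d.toNat, (Int.toNat_of_nonneg hd0).symm⟩
    simp only [Bool.and_eq_true, beq_iff_eq] at hp
    obtain ⟨hmod, heq⟩ := hp
    rw [PySem.Int.mod_eq_zero_iff_dvd] at hmod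
    refine ⟨dN, by exact_mod_cast hm1, by omega, by exact_mod_cast hmod, ?_⟩
    rw [PySem.List.slice_to _ hd0, pvFloordiv_cast _ _ (by exact_mod_cast hm1)] at heq
    unfold PySem.List.pyRepeat at heq
    simpa using heq
  · rintro ⟨dN, hd1, hdn, hdvd, heq⟩
    refine ⟨(dN : Int), ?_, ?_⟩
    · rw [PySem.List.mem_pyRange_one]
      omega
    · simp only [Bool.and_eq_true, beq_iff_eq]
      refine ⟨by rw [PySem.Int.mod_eq_zero_iff_dvd]; exact_mod_cast hdvd, ?_⟩
      rw [PySem.List.slice_to _ (by omega : (0:Int) ≤ (dN : Int)),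
        pvFloordiv_cast _ _ (by omega)]
      unfold PySem.List.pyRepeat
      simpa using heq

theorem pvCnt_pos_iff (cs : List Char) : pvCnt cs ≠ 0 ↔ pvIsPeriodic cs = true := by
  rw [pvA_char, pvB_char]
  constructor
  · rintro ⟨kN, hk2, hkn, hdvd, hblocks⟩
    have hn0 : cs.length ≠ 0 := by
      intro h
      omega
    set n := cs.length with hn
    set dN := n / kN with hdN
    have hlen : n = kN * dN := (Nat.mul_div_cancel' hdvd).symm
    have hcs : cs = (List.replicate kN (cs.take dN)).flatten :=
      pvRepeatOfBlocks cs dN kN hlen hblocks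
    refine ⟨dN, ?_, ?_, Nat.div_dvd_of_dvd hdvd, ?_⟩
    · exact Nat.div_pos hkn (by omega)
    · exact Nat.div_lt_self (by omega) (by omega)
    · rw [Nat.div_div_self hdvd hn0]
      exact hcs
  · rintro ⟨dN, hd1, hdn, hdvd, heq⟩
    have hn0 : cs.length ≠ 0 := by omega
    set n := cs.length with hn
    set kN := n / dN with hkN
    have hdd : n / kN = dN := Nat.div_div_self hdvd hn0
    have hk1 : 1 ≤ kN := Nat.div_pos (by omega) (by omega)
    have hk2 : 2 ≤ kN := by
      by_contra h
      have hkN1 : kN = 1 := by omega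
      have h3 : dN * kN = n := by rw [hkN]; exact Nat.mul_div_cancel' hdvd
      rw [hkN1] at h3
      omega
    have hb : (cs.take dN).length = dN := by
      rw [List.length_take]
      omega
    refine ⟨kN, hk2, Nat.div_le_self _ _, Nat.div_dvd_of_dvd hdvd, ?_⟩
    rw [hdd]
    intro iN h1 h2
    conv_lhs => rw [heq]
    conv_rhs => rw [heq]
    rw [pvBlocksOfRepeat _ dN _ _ hb (by omega : iN - 1 < kN),
        pvBlocksOfRepeat _ dN _ _ hb h2]

-- A's per-id step (the body of A's loop over one range)
def pvBodyA (st : Int × List Int) (id_value : Int) : Int × List Int :=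
  (PySem.List.pyRange 1 (((PySem.Int.toChars id_value).length : Int) + 1)).foldl
    (fun st k =>
      if PySem.Int.mod ((PySem.Int.toChars id_value).length : Int) k ≠ 0 then st
      else pvInnerA id_value (PySem.Int.toChars id_value)
        ((PySem.Int.toChars id_value).length : Int) k (PySem.List.pyRange 1 k) st) st

-- B's per-id step
def pvBodyB (st : PySem.Set Int × Int) (x : Int) : PySem.Set Int × Int :=
  if !(PySem.Set.contains st.1 x) && pvIsPeriodic (PySem.Int.toChars x)
  then (PySem.Set.add st.1 x, st.2 + x) else st

def pvR (ids : List Int) (st : PySem.Set Int × Int) : Prop :=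
  st.1 = PySem.Set.ofList ids ∧ st.2 = (PySem.Set.ofList ids).sum

def pvRangeOf (r : List Int) : List Int :=
  PySem.List.pyRange ((PySem.List.pyGet? r 0).getD 0) (((PySem.List.pyGet? r 1).getD 0) + 1)

theorem pvSetAdd_sum (S : PySem.Set Int) (v : Int) :
    (PySem.Set.add S v).sum = if PySem.Set.contains S v then S.sum else S.sum + v := by
  unfold PySem.Set.add
  split_ifs with h <;> simp

theorem pvSetAdd_add (S : PySem.Set Int) (v : Int) :
    PySem.Set.add (PySem.Set.add S v) v = PySem.Set.add S v := by
  unfold PySem.Set.add PySem.Set.contains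
  split_ifs with h h2 <;> simp_all

theorem pvSetAdd_replicate (S : PySem.Set Int) (v : Int) (c : Nat) :
    List.foldl PySem.Set.add S (List.replicate c v) =
      if c = 0 then S else PySem.Set.add S v := by
  induction c generalizing S with
  | zero => simp
  | succ n ih =>
    rw [List.replicate_succ, List.foldl_cons, ih]
    by_cases h : n = 0
    · simp [h]
    · rw [if_neg h]; exact pvSetAdd_add S v

theorem pvStep (ids : List Int) (st : PySem.Set Int × Int) (v : Int) (c : Nat)
    (hc : c ≠ 0 ↔ pvIsPeriodic (PySem.Int.toChars v) = true) (h : pvR ids st) :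
    pvR (ids ++ List.replicate c v) (pvBodyB st v) := by
  obtain ⟨h1, h2⟩ := h
  have hof : PySem.Set.ofList (ids ++ List.replicate c v)
      = if c = 0 then PySem.Set.ofList ids else PySem.Set.add (PySem.Set.ofList ids) v := by
    unfold PySem.Set.ofList
    rw [List.foldl_append]
    exact pvSetAdd_replicate _ v c
  unfold pvBodyB pvR
  by_cases hp : pvIsPeriodic (PySem.Int.toChars v) = true
  · have hc0 : ¬ (c = 0) := by rw [← hc] at hp; exact hp
    rw [hof]; simp only [hc0, if_false]
    by_cases hmem : PySem.Set.contains st.1 v = true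
    · simp only [hmem, Bool.not_true, Bool.false_and]
      have hadd : PySem.Set.add (PySem.Set.ofList ids) v = PySem.Set.ofList ids := by
        rw [← h1]; unfold PySem.Set.add; rw [if_pos hmem]
      rw [hadd]; exact ⟨h1, h2⟩
    · simp only [hmem, Bool.not_false, Bool.true_and, hp, if_true]
      refine ⟨by rw [h1], ?_⟩
      rw [pvSetAdd_sum, ← h1, if_neg hmem, h2, h1]
  · have hc0 : c = 0 := by by_contra hx; exact hp (hc.mp hx)
    subst hc0
    simp only [hp, Bool.and_false, List.replicate_zero, List.append_nil]
    exact ⟨h1, h2⟩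

theorem pvFoldIds (xs : List Int) (stA : Int × List Int) (stB : PySem.Set Int × Int)
    (h : pvR stA.2 stB) :
    pvR ((xs.foldl pvBodyA stA).2) (xs.foldl pvBodyB stB) := by
  induction xs generalizing stA stB with
  | nil => exact h
  | cons x xs ih =>
    rw [List.foldl_cons, List.foldl_cons]
    apply ih
    have hA : (pvBodyA stA x).2 = stA.2 ++ List.replicate (pvCnt (PySem.Int.toChars x)) x :=
      pvMiddleA_eq x (PySem.Int.toChars x) stA
    rw [hA]
    exact pvStep stA.2 stB x (pvCnt (PySem.Int.toChars x))
      (pvCnt_pos_iff (PySem.Int.toChars x)) h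

theorem pvFoldRanges (rs : List (List Int)) (stA : Int × List Int) (stB : PySem.Set Int × Int)
    (h : pvR stA.2 stB) :
    pvR ((rs.foldl (fun st r => (pvRangeOf r).foldl pvBodyA st) stA).2)
        (rs.foldl (fun st r => (pvRangeOf r).foldl pvBodyB st) stB) := by
  induction rs generalizing stA stB with
  | nil => exact h
  | cons r rs ih =>
    rw [List.foldl_cons, List.foldl_cons]
    exact ih _ _ (pvFoldIds (pvRangeOf r) stA stB h)

-- ===== VERDICT (by name: the statement is the Claim_ definition above) =====
theorem get_answer_part_2_spec : Claim_equal_get_answer_part_2 := by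
  intro id_ranges _ _
  unfold Spec_get_answer_part_2
  show (PySem.List.dedup
      ((id_ranges.foldl (fun st r => (pvRangeOf r).foldl pvBodyA st)
        ((0 : Int), ([] : List Int))).2)).sum
    = (id_ranges.foldl (fun st r => (pvRangeOf r).foldl pvBodyB st)
        ((PySem.Set.empty : PySem.Set Int), (0 : Int))).2
  have h := pvFoldRanges id_ranges ((0 : Int), ([] : List Int))
    ((PySem.Set.empty : PySem.Set Int), (0 : Int)) ⟨rfl, rfl⟩
  rw [PySem.List.dedup_eq_ofList]
  exact h.2.symm
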